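-- pv_equiv track=rewrite | github.com/0hhanum/algorithm_study | programmers/exhausted_search/mock_exam.py | solution
-- ===== SOURCE A (Python) =====
-- def solution(answers):
--     result = [0, 0, 0]
--     answer1 = "".join(["12345" for _ in range(8)])
--     answer2 = "".join(["21232425" for _ in range(5)])
--     answer3 = "".join(["3311224455" for _ in range(4)])
--
--     total_len, split_len = len(answers), 40
--     splited_answers = [answers[i: i + split_len] for i in range(0, total_len, split_len)]
--
--     for answer in splited_answers:
--         i = 0
--         for a in answer:
--             a = str(a)
--             if a == answer1[i]:
--                 result[0] += 1
--             if a == answer2[i]: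
--                 result[1] += 1
--             if a == answer3[i]:
--                 result[2] += 1
--             i += 1
--     best_score = max(result)
--     answer = []
--     for i in range(3):
--         if result[i] == best_score:
--             answer.append(i + 1)
--     return answer
-- ===== SOURCE B (Python) =====
-- def solution(answers):
--     bases = ["12345", "21232425", "3311224455"]
--     result = [sum(1 for j, a in enumerate(answers) if str(a) == b[j % len(b)])
--               for b in bases]
--     best = max(result)
--     return [i + 1 for i in range(3) if result[i] == best]
-- ===== Notes on version B (the rewrite author's own statement) =====
-- stated objective: idiomatic
-- what changed: A builds three 40-char repeated pattern strings, slices the answers into 40-length chunks and scores all three patterns in one pass with a per-chunk reset index; B drops the chunking and the expanded strings entirely and, for each of the three short base patterns, runs an independent comprehension pass that counts positions j where str(a) equals base[j % len(base)].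
import Mathlib
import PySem

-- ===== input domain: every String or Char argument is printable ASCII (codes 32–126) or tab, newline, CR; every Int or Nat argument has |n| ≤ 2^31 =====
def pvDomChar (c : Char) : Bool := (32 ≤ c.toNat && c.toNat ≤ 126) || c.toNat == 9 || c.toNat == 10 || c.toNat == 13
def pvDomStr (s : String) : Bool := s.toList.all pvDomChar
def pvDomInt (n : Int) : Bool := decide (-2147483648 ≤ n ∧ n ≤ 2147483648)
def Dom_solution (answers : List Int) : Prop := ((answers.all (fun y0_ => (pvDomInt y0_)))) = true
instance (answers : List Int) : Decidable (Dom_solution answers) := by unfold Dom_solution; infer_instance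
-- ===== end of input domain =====

-- B replaces A's 40-length pattern expansion + chunked single scoring pass by three
-- independent modulo-cycled counting passes over the short base patterns (idiomatic; same cost).

-- ===== PORT A =====
-- the three expanded 40-char pattern strings ("".join of repeats), kept as List Char
def pvAns1 : List Char := PySem.Chars.join [] (List.replicate 8 "12345".toList)
def pvAns2 : List Char := PySem.Chars.join [] (List.replicate 5 "21232425".toList)
def pvAns3 : List Char := PySem.Chars.join [] (List.replicate 4 "3311224455".toList)

-- body of A's inner loop: Python's `result` (a list of exactly 3 counters mutated by
-- index) is ported as a triple, `i` is the running index; str(a) == answer1[i] is the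
-- one-char comparison PySem.Int.toChars a == [answer1[i]] (indices stay in range)
def pvStepA (p : (Int × Int × Int) × Int) (a : Int) : (Int × Int × Int) × Int :=
  let s := PySem.Int.toChars a
  let res := p.1
  let i := p.2
  let r0 := if s == [PySem.List.pyGetD pvAns1 i ' '] then res.1 + 1 else res.1
  let r1 := if s == [PySem.List.pyGetD pvAns2 i ' '] then res.2.1 + 1 else res.2.1
  let r2 := if s == [PySem.List.pyGetD pvAns3 i ' '] then res.2.2 + 1 else res.2.2
  ((r0, r1, r2), i + 1)

def solution (answers : List Int) : List Int :=
  let totalLen : Int := answers.length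
  let splited := (PySem.List.pyRange 0 totalLen 40).map
    (fun i => PySem.List.slice answers (some i) (some (i + 40)))
  let res := splited.foldl (fun res chunk => (chunk.foldl pvStepA (res, 0)).1) ((0, 0, 0) : Int × Int × Int)
  let result : List Int := [res.1, res.2.1, res.2.2]
  let best := (PySem.List.max? result (fun x => x)).getD 0
  (PySem.List.pyRange 0 3 1).foldl
    (fun acc i => if PySem.List.pyGetD result i 0 == best then acc ++ [i + 1] else acc) []

-- ===== PORT B =====
-- sum(1 for j, a in enumerate(answers) if str(a) == b[j % len(b)])
def pvCount (b : List Char) (answers : List Int) : Int :=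
  ((PySem.List.enumerate answers 0).map
    (fun p => if PySem.Int.toChars p.2 == [PySem.List.pyGetD b (PySem.Int.mod p.1 (b.length : Int)) ' ']
              then (1 : Int) else 0)).sum

def solution_alt (answers : List Int) : List Int :=
  let bases := ["12345".toList, "21232425".toList, "3311224455".toList]
  let result := bases.map (fun b => pvCount b answers)
  let best := (PySem.List.max? result (fun x => x)).getD 0
  ((PySem.List.pyRange 0 3 1).filter (fun i => PySem.List.pyGetD result i 0 == best)).map (fun i => i + 1)

-- ===== PRECONDITION & SPEC =====
def Spec_solution (answers : List Int) (out : List Int) : Prop := out = solution_alt answers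
instance (answers : List Int) (out : List Int) : Decidable (Spec_solution answers out) := by unfold Spec_solution; infer_instance

-- ===== CLAIM (what is proved, stated in full; the proofs are below) =====
def Claim_equal_solution : Prop := ∀ (answers : List Int), Dom_solution answers → Spec_solution answers (solution answers)

-- ===== LEMMAS AND PROOFS =====

-- match count against base pattern b, cycled by modulus, starting at global index j
def pvCnt (b : List Char) (j : Nat) : List Int → Int
  | [] => 0
  | a :: t =>
    (if PySem.Int.toChars a == [PySem.List.pyGetD b (PySem.Int.mod (j : Int) (b.length : Int)) ' ']
     then (1 : Int) else 0) + pvCnt b (j + 1) t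

-- match count against the expanded 40-char pattern, starting at local index j
def pvCntA (full : List Char) (j : Nat) : List Int → Int
  | [] => 0
  | a :: t =>
    (if PySem.Int.toChars a == [PySem.List.pyGetD full (j : Int) ' '] then (1 : Int) else 0)
      + pvCntA full (j + 1) t

def pvChunks (xs : List Int) : List (List Int) :=
  if xs = [] then [] else xs.take 40 :: pvChunks (xs.drop 40)
termination_by xs.length
decreasing_by
  simp only [List.length_drop]
  have : xs.length ≠ 0 := by simpa [List.length_eq_zero_iff] using ‹¬ xs = []›
  omega

lemma pvEnumerate_cons {α : Type} (x : α) (t : List α) (s : Int) :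
    PySem.List.enumerate (x :: t) s = (s, x) :: PySem.List.enumerate t (s + 1) := rfl

lemma pvCount_eq_pvCnt (b : List Char) (xs : List Int) (j : Nat) :
    ((PySem.List.enumerate xs (j : Int)).map
      (fun p => if PySem.Int.toChars p.2 == [PySem.List.pyGetD b (PySem.Int.mod p.1 (b.length : Int)) ' ']
                then (1 : Int) else 0)).sum = pvCnt b j xs := by
  induction xs generalizing j with
  | nil => rfl
  | cons a t ih =>
    have hc : ((j : Int) + 1) = ((j + 1 : Nat) : Int) := by push_cast; ring
    simp only [pvEnumerate_cons, List.map_cons, List.sum_cons, pvCnt, hc, ih]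

lemma pvCnt_append (b : List Char) (xs ys : List Int) (j : Nat) :
    pvCnt b j (xs ++ ys) = pvCnt b j xs + pvCnt b (j + xs.length) ys := by
  induction xs generalizing j with
  | nil => simp [pvCnt]
  | cons a t ih =>
    simp only [List.cons_append, pvCnt, ih, List.length_cons]
    have : j + 1 + t.length = j + (t.length + 1) := by omega
    rw [this, add_assoc]

lemma pvCnt_shift (b : List Char) (k : Nat) (h : (b.length : Int) ∣ (k : Int)) (xs : List Int) (j : Nat) :
    pvCnt b (j + k) xs = pvCnt b j xs := by
  induction xs generalizing j with
  | nil => rfl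
  | cons a t ih =>
    have hm : PySem.Int.mod ((j + k : Nat) : Int) (b.length : Int)
        = PySem.Int.mod (j : Int) (b.length : Int) := by
      unfold PySem.Int.mod
      rw [Int.fmod_eq_emod, Int.fmod_eq_emod]
      have h0 : (0 : Int) ≤ (b.length : Int) := by positivity
      simp only [h0, true_or, if_true, add_zero]
      push_cast
      obtain ⟨c, hc⟩ := h
      rw [hc, Int.add_mul_emod_self_left]
    simp only [pvCnt, hm]
    have : j + k + 1 = j + 1 + k := by omega
    rw [this, ih]

lemma pvInnerA (chunk : List Int) (res : Int × Int × Int) (i0 : Nat) :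
    chunk.foldl pvStepA (res, (i0 : Int)) =
      ((res.1 + pvCntA pvAns1 i0 chunk, res.2.1 + pvCntA pvAns2 i0 chunk,
        res.2.2 + pvCntA pvAns3 i0 chunk), (i0 : Int) + chunk.length) := by
  induction chunk generalizing res i0 with
  | nil => simp [pvCntA]
  | cons a t ih =>
    have hc : ((i0 : Int) + 1) = ((i0 + 1 : Nat) : Int) := by push_cast; ring
    simp only [List.foldl_cons, pvStepA, hc, ih, pvCntA, List.length_cons]
    simp only [Prod.mk.injEq]
    refine ⟨⟨?_, ?_, ?_⟩, by push_cast; ring⟩ <;> (split_ifs <;> ring)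

lemma pvConv1 (xs : List Int) (i0 : Nat) (h : i0 + xs.length ≤ 40) :
    pvCntA pvAns1 i0 xs = pvCnt "12345".toList i0 xs := by
  induction xs generalizing i0 with
  | nil => rfl
  | cons a t ih =>
    have hch : ∀ i : Nat, i < 40 → PySem.List.pyGetD pvAns1 (i : Int) ' '
        = PySem.List.pyGetD "12345".toList (PySem.Int.mod (i : Int) (("12345".toList.length : Nat) : Int)) ' ' := by
      decide
    simp only [pvCntA, pvCnt]
    rw [hch i0 (by simp at h; omega), ih]
    simp at h ⊢; omega

lemma pvConv2 (xs : List Int) (i0 : Nat) (h : i0 + xs.length ≤ 40) :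
    pvCntA pvAns2 i0 xs = pvCnt "21232425".toList i0 xs := by
  induction xs generalizing i0 with
  | nil => rfl
  | cons a t ih =>
    have hch : ∀ i : Nat, i < 40 → PySem.List.pyGetD pvAns2 (i : Int) ' '
        = PySem.List.pyGetD "21232425".toList (PySem.Int.mod (i : Int) (("21232425".toList.length : Nat) : Int)) ' ' := by
      decide
    simp only [pvCntA, pvCnt]
    rw [hch i0 (by simp at h; omega), ih]
    simp at h ⊢; omega

lemma pvConv3 (xs : List Int) (i0 : Nat) (h : i0 + xs.length ≤ 40) :
    pvCntA pvAns3 i0 xs = pvCnt "3311224455".toList i0 xs := by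
  induction xs generalizing i0 with
  | nil => rfl
  | cons a t ih =>
    have hch : ∀ i : Nat, i < 40 → PySem.List.pyGetD pvAns3 (i : Int) ' '
        = PySem.List.pyGetD "3311224455".toList (PySem.Int.mod (i : Int) (("3311224455".toList.length : Nat) : Int)) ' ' := by
      decide
    simp only [pvCntA, pvCnt]
    rw [hch i0 (by simp at h; omega), ih]
    simp at h ⊢; omega

lemma pvSplitCnt (b : List Char) (hd : (b.length : Int) ∣ 40) (xs : List Int) :
    pvCnt b 0 xs = pvCnt b 0 (xs.take 40) + pvCnt b 0 (xs.drop 40) := by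
  by_cases h : xs.length ≤ 40
  · rw [List.take_of_length_le h, List.drop_eq_nil_of_le h]
    simp [pvCnt]
  · conv_lhs => rw [← List.take_append_drop 40 xs]
    rw [pvCnt_append]
    have hlen : (xs.take 40).length = 40 := by
      simp [List.length_take]; omega
    rw [hlen, pvCnt_shift b 40 (by simpa using hd) _ 0]

lemma pvChunks_eq (xs : List Int) :
    (PySem.List.pyRange 0 (xs.length : Int) 40).map
      (fun i => PySem.List.slice xs (some i) (some (i + 40))) = pvChunks xs := by
  induction xs using pvChunks.induct with
  | case1 =>
    rw [show PySem.List.pyRange 0 (([] : List Int).length : Int) 40 = [] from by decide]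
    simp [pvChunks]
  | case2 xs h ih =>
    rw [pvChunks, if_neg h, ← ih]
    rw [PySem.List.pyRange_of_pos 0 (xs.length : Int) (by norm_num),
        PySem.List.pyRange_of_pos 0 ((xs.drop 40).length : Int) (by norm_num)]
    have hn1 : 1 ≤ xs.length := by
      have := List.length_pos_of_ne_nil h; omega
    rw [if_pos (by exact_mod_cast hn1 : (0 : Int) < (xs.length : Int))]
    simp only [List.length_drop]
    by_cases hle : xs.length ≤ 40
    · have hz : ¬ ((0 : Int) < ((xs.length - 40 : Nat) : Int)) := by omega
      rw [if_neg hz]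
      have hc1 : (((xs.length : Int) - 0 + 40 - 1) / 40).toNat = 1 := by omega
      rw [hc1]
      simp only [List.range_one, List.map_cons, List.map_nil, Nat.cast_zero]
      rw [PySem.List.slice_toNat _ (by norm_num) (by norm_num)]
      norm_num
      omega
    · have hp : (0 : Int) < ((xs.length - 40 : Nat) : Int) := by omega
      rw [if_pos hp]
      have hc : (((xs.length : Int) - 0 + 40 - 1) / 40).toNat
          = ((((xs.length - 40 : Nat) : Int) - 0 + 40 - 1) / 40).toNat + 1 := by omega
      rw [hc, List.range_succ_eq_map]
      simp only [List.map_cons, List.map_map, Nat.cast_zero]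
      have hhead : PySem.List.slice xs (some (0 + 40 * 0)) (some (0 + 40 * 0 + 40))
          = List.take 40 xs := by
        rw [PySem.List.slice_toNat _ (by norm_num) (by norm_num)]
        norm_num
        omega
      rw [hhead]
      congr 1
      apply List.map_congr_left
      intro k hk
      simp only [Function.comp_apply, Nat.succ_eq_add_one]
      rw [PySem.List.slice_toNat _ (by positivity) (by positivity),
          PySem.List.slice_toNat _ (by positivity) (by positivity),
          List.drop_drop]
      congr 1
      · omega
      · congr 1
        omega

lemma pvMain (xs : List Int) (res : Int × Int × Int) :
    (pvChunks xs).foldl (fun res chunk => (chunk.foldl pvStepA (res, 0)).1) res =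
      (res.1 + pvCnt "12345".toList 0 xs, res.2.1 + pvCnt "21232425".toList 0 xs,
       res.2.2 + pvCnt "3311224455".toList 0 xs) := by
  induction xs using pvChunks.induct generalizing res with
  | case1 =>
    simp [pvChunks, pvCnt]
  | case2 xs h ih =>
    rw [pvChunks, if_neg h, List.foldl_cons]
    have h1 := pvInnerA (xs.take 40) res 0
    simp only [Nat.cast_zero] at h1
    have hb : (0 : Nat) + (xs.take 40).length ≤ 40 := by
      simp [List.length_take]
    rw [h1]
    simp only [pvConv1 _ _ hb, pvConv2 _ _ hb, pvConv3 _ _ hb]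
    rw [ih]
    rw [pvSplitCnt "12345".toList (by decide) xs,
        pvSplitCnt "21232425".toList (by decide) xs,
        pvSplitCnt "3311224455".toList (by decide) xs]
    simp only [Prod.mk.injEq]
    refine ⟨?_, ?_, ?_⟩ <;> ring

lemma pvTail (r : List Int) (best : Int) :
    (PySem.List.pyRange 0 3 1).foldl
      (fun acc i => if PySem.List.pyGetD r i 0 == best then acc ++ [i + 1] else acc) [] =
    ((PySem.List.pyRange 0 3 1).filter (fun i => PySem.List.pyGetD r i 0 == best)).map (fun i => i + 1) := by
  have h3 : PySem.List.pyRange 0 3 1 = [0, 1, 2] := by decide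
  rw [h3]
  cases c0 : (PySem.List.pyGetD r 0 0 == best) <;>
    cases c1 : (PySem.List.pyGetD r 1 0 == best) <;>
      cases c2 : (PySem.List.pyGetD r 2 0 == best) <;>
        simp [List.foldl, List.filter, c0, c1, c2]

-- ===== VERDICT (by name: the statement is the Claim_ definition above) =====
theorem solution_spec : Claim_equal_solution := by
  intro answers _
  show solution answers = solution_alt answers
  have hB1 : pvCount "12345".toList answers = pvCnt "12345".toList 0 answers := by
    have h := pvCount_eq_pvCnt "12345".toList answers 0
    rw [Nat.cast_zero] at h
    exact h
  have hB2 : pvCount "21232425".toList answers = pvCnt "21232425".toList 0 answers := by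
    have h := pvCount_eq_pvCnt "21232425".toList answers 0
    rw [Nat.cast_zero] at h
    exact h
  have hB3 : pvCount "3311224455".toList answers = pvCnt "3311224455".toList 0 answers := by
    have h := pvCount_eq_pvCnt "3311224455".toList answers 0
    rw [Nat.cast_zero] at h
    exact h
  simp only [solution, solution_alt, List.map_cons, List.map_nil]
  rw [pvChunks_eq, pvMain answers (0, 0, 0), hB1, hB2, hB3]
  simp only [zero_add]
  rw [pvTail]
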